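-- pv_equiv track=rewrite | github.com/prashanth-7861/WireSeal | src/wireseal/client/tunnel.py | apply_dns_override
-- ===== SOURCE A (Python) =====
-- def apply_dns_override(config_text: str, dns_servers: str) -> str:
--     """Replace or inject DNS = line in [Interface] section.
--
--     Args:
--         config_text: Raw WireGuard .conf content.
--         dns_servers: Comma-separated DNS IPs (e.g. "1.1.1.1, 8.8.8.8").
--
--     Returns:
--         Modified config text with DNS line replaced/added.
--     """
--     if not dns_servers or not dns_servers.strip():
--         return config_text
--
--     lines = config_text.splitlines()
--     result: list[str] = []
--     in_interface = False
--     dns_written = False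
--
--     for line in lines:
--         stripped = line.strip().lower()
--
--         if stripped == "[interface]":
--             in_interface = True
--             result.append(line)
--             continue
--         elif stripped.startswith("[") and stripped.endswith("]"):
--             # Entering new section — if still in Interface and DNS not written, add it
--             if in_interface and not dns_written:
--                 result.append(f"DNS = {dns_servers.strip()}")
--                 dns_written = True
--             in_interface = False
--             result.append(line)
--             continue
--
--         if in_interface and stripped.startswith("dns"):
--             # Replace existing DNS line
--             result.append(f"DNS = {dns_servers.strip()}")
--             dns_written = True
--             continue
--
--         result.append(line)
--
--     # If config has only [Interface] with no following section
--     if in_interface and not dns_written: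
--         result.append(f"DNS = {dns_servers.strip()}")
--
--     return "\n".join(result)
-- ===== SOURCE B (Python) =====
-- def _is_header(line):
--     s = line.strip().lower()
--     return s.startswith("[") and s.endswith("]")
--
--
-- def _group(lines):
--     """One pass: split lines into a leading block and (header, body) sections."""
--     leading = []
--     groups = []
--     cur = None  # current (header, body)
--     for ln in lines:
--         if _is_header(ln):
--             if cur is not None:
--                 groups.append(cur)
--             cur = (ln, [])
--         elif cur is not None:
--             cur[1].append(ln)
--         else:
--             leading.append(ln)
--     if cur is not None:
--         groups.append(cur)
--     return leading, groups
--
--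
-- def apply_dns_override(config_text: str, dns_servers: str) -> str:
--     dns = dns_servers.strip()
--     if not dns:
--         return config_text
--     dns_line = "".join(["DNS = ", dns])
--     leading, groups = _group(config_text.splitlines())
--     out = list(leading)
--     prev_interface = False
--     written = False
--     for header, body in groups:
--         interface = header.strip().lower() == "[interface]"
--         if prev_interface and not interface and not written:
--             out.append(dns_line)
--             written = True
--         out.append(header)
--         if interface:
--             for ln in body:
--                 if ln.strip().lower().startswith("dns"):
--                     out.append(dns_line)
--                     written = True
--                 else:
--                     out.append(ln)
--         else:
--             out.extend(body)
--         prev_interface = interface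
--     if prev_interface and not written:
--         out.append(dns_line)
--     return "\n".join(out)
-- ===== Notes on version B (the rewrite author's own statement) =====
-- stated objective: alternative
-- what changed: B first partitions the split lines into a leading block plus (header, body) sections in one pass, then emits per section -- replacing DNS lines inside [Interface] bodies and injecting the DNS line at a section boundary or at the end -- instead of A's single line-by-line state machine with in_interface/dns_written flags.
import Mathlib
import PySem

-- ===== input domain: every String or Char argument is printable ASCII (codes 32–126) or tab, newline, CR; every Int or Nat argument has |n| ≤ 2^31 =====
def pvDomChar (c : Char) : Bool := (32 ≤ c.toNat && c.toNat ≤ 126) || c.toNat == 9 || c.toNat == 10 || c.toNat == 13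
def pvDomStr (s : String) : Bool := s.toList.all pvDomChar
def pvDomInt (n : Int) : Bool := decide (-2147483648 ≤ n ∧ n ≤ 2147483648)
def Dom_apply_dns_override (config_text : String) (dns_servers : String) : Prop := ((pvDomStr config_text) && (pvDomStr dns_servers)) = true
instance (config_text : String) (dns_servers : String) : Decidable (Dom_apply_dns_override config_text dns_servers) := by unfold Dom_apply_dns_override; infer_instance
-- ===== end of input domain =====

-- B re-decomposes A's line-by-line flag machine as: partition into leading block + (header, body)
-- sections, then emit per section (objective: alternative decomposition, same cost).

-- ===== PORT A =====
-- step of A's 'for line in lines' loop; state = (result, in_interface, dns_written)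
def applyDnsStepA (dns_servers : String) (st : List String × Bool × Bool) (line : String) :
    List String × Bool × Bool :=
  let stripped := PySem.Str.lower (PySem.Str.strip line)
  if stripped == "[interface]" then
    (st.1 ++ [line], true, st.2.2)
  else if PySem.Str.startswith stripped "[" && PySem.Str.endswith stripped "]" then
    let r := if st.2.1 && !st.2.2 then
        (st.1 ++ [PySem.Str.join "" ["DNS = ", PySem.Str.strip dns_servers]], true)
      else (st.1, st.2.2)
    (r.1 ++ [line], false, r.2)
  else if st.2.1 && PySem.Str.startswith stripped "dns" then
    (st.1 ++ [PySem.Str.join "" ["DNS = ", PySem.Str.strip dns_servers]], st.2.1, true)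
  else
    (st.1 ++ [line], st.2.1, st.2.2)

def apply_dns_override (config_text : String) (dns_servers : String) : String :=
  if dns_servers == "" || PySem.Str.strip dns_servers == "" then config_text
  else
    let lines := PySem.Str.splitlines config_text
    let st := lines.foldl (applyDnsStepA dns_servers) ([], false, false)
    let res := if st.2.1 && !st.2.2 then
        st.1 ++ [PySem.Str.join "" ["DNS = ", PySem.Str.strip dns_servers]]
      else st.1
    PySem.Str.join "\n" res

-- ===== PORT B =====
def pvIsHeaderB (line : String) : Bool :=
  let s := PySem.Str.lower (PySem.Str.strip line)
  PySem.Str.startswith s "[" && PySem.Str.endswith s "]"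

-- step of _group's loop; state = (leading, groups, cur)
def pvGroupStepB (st : List String × List (String × List String) × Option (String × List String))
    (ln : String) : List String × List (String × List String) × Option (String × List String) :=
  if pvIsHeaderB ln then
    (st.1, (match st.2.2 with | some c => st.2.1 ++ [c] | none => st.2.1), some (ln, []))
  else match st.2.2 with
    | some c => (st.1, st.2.1, some (c.1, c.2 ++ [ln]))
    | none => (st.1 ++ [ln], st.2.1, none)

def pvGroupB (lines : List String) : List String × List (String × List String) :=
  let st := lines.foldl pvGroupStepB ([], [], none)
  (st.1, match st.2.2 with | some c => st.2.1 ++ [c] | none => st.2.1)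

-- step of B's 'for header, body in groups' loop; state = (out, prev_interface, written)
def pvSectionStepB (dns_line : String) (st : List String × Bool × Bool)
    (g : String × List String) : List String × Bool × Bool :=
  let interface := PySem.Str.lower (PySem.Str.strip g.1) == "[interface]"
  let st1 := if st.2.1 && !interface && !st.2.2 then (st.1 ++ [dns_line], true)
    else (st.1, st.2.2)
  let out1 := st1.1 ++ [g.1]
  if interface then
    let r := g.2.foldl (fun (s : List String × Bool) ln =>
      if PySem.Str.startswith (PySem.Str.lower (PySem.Str.strip ln)) "dns" then
        (s.1 ++ [dns_line], true)
      else (s.1 ++ [ln], s.2)) (out1, st1.2)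
    (r.1, interface, r.2)
  else
    (out1 ++ g.2, interface, st1.2)

def apply_dns_override_alt (config_text : String) (dns_servers : String) : String :=
  let dns := PySem.Str.strip dns_servers
  if dns == "" then config_text
  else
    let dns_line := PySem.Str.join "" ["DNS = ", dns]
    let lg := pvGroupB (PySem.Str.splitlines config_text)
    let st := lg.2.foldl (pvSectionStepB dns_line) (lg.1, false, false)
    let out := if st.2.1 && !st.2.2 then st.1 ++ [dns_line] else st.1
    PySem.Str.join "\n" out

-- ===== PRECONDITION & SPEC =====
def Spec_apply_dns_override (config_text : String) (dns_servers : String) (out : String) : Prop := out = apply_dns_override_alt config_text dns_servers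
instance (config_text : String) (dns_servers : String) (out : String) : Decidable (Spec_apply_dns_override config_text dns_servers out) := by unfold Spec_apply_dns_override; infer_instance

-- ===== CLAIM (what is proved, stated in full; the proofs are below) =====
def Claim_equal_apply_dns_override : Prop := ∀ (config_text : String) (dns_servers : String), Dom_apply_dns_override config_text dns_servers → Spec_apply_dns_override config_text dns_servers (apply_dns_override config_text dns_servers)

-- ===== LEMMAS AND PROOFS =====

-- proof-side predicates on a line
def pvIsIface (l : String) : Bool := PySem.Str.lower (PySem.Str.strip l) == "[interface]"
def pvIsDns (l : String) : Bool :=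
  PySem.Str.startswith (PySem.Str.lower (PySem.Str.strip l)) "dns"

-- functional form of A's whole pass (output lines appended, including the trailing injection)
def pvArun (D : String) : List String → Bool → Bool → List String
  | [], ii, dw => if ii && !dw then [D] else []
  | l :: ls, ii, dw =>
    if pvIsIface l then l :: pvArun D ls true dw
    else if pvIsHeaderB l then
      (if ii && !dw then [D] else []) ++ l :: pvArun D ls false (ii || dw)
    else if ii && pvIsDns l then D :: pvArun D ls ii true
    else l :: pvArun D ls ii dw

-- functional form of grouping
def pvGroupRec : List String → List String × List (String × List String)
  | [] => ([], [])
  | l :: ls =>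
    let r := pvGroupRec ls
    if pvIsHeaderB l then ([], (l, r.1) :: r.2) else (l :: r.1, r.2)

-- functional form of B's interface-body loop
def pvBody (D : String) : List String → Bool → List String × Bool
  | [], dw => ([], dw)
  | l :: ls, dw =>
    if pvIsDns l then
      let r := pvBody D ls true
      (D :: r.1, r.2)
    else
      let r := pvBody D ls dw
      (l :: r.1, r.2)

-- functional form of B's section loop (output lines appended, incl. trailing injection)
def pvBproc (D : String) : List (String × List String) → Bool → Bool → List String
  | [], pi, w => if pi && !w then [D] else []
  | (h, b) :: gs, pi, w =>
    if pvIsIface h then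
      let r := pvBody D b w
      h :: r.1 ++ pvBproc D gs true r.2
    else
      (if pi && !w then [D] else []) ++ h :: b ++ pvBproc D gs false (pi || w)

theorem pvIface_isHeader (l : String) (h : pvIsIface l = true) : pvIsHeaderB l = true := by
  unfold pvIsIface at h
  rw [beq_iff_eq] at h
  simp only [pvIsHeaderB, h]
  decide

-- one step of A's loop, phrased with the proof-side predicates
theorem pvStepA_eq (dns : String) (res : List String) (ii dw : Bool) (l : String) :
    applyDnsStepA dns (res, ii, dw) l =
      (if pvIsIface l then (res ++ [l], true, dw)
       else if pvIsHeaderB l then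
        ((if ii && !dw then res ++ [PySem.Str.join "" ["DNS = ", PySem.Str.strip dns]] else res)
          ++ [l], false, ii || dw)
       else if ii && pvIsDns l then
        (res ++ [PySem.Str.join "" ["DNS = ", PySem.Str.strip dns]], ii, true)
       else (res ++ [l], ii, dw)) := by
  simp only [applyDnsStepA, pvIsIface, pvIsHeaderB, pvIsDns]
  cases ii <;> cases dw <;> split_ifs <;> simp_all

def pvFinA (D : String) (st : List String × Bool × Bool) : List String :=
  if st.2.1 && !st.2.2 then st.1 ++ [D] else st.1

def pvFinG (st : List String × List (String × List String) × Option (String × List String)) :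
    List String × List (String × List String) :=
  (st.1, match st.2.2 with | some c => st.2.1 ++ [c] | none => st.2.1)

set_option maxHeartbeats 1000000 in
theorem pvAfold (dns : String) (ls : List String) (res : List String) (ii dw : Bool) :
    pvFinA (PySem.Str.join "" ["DNS = ", PySem.Str.strip dns])
        (ls.foldl (applyDnsStepA dns) (res, ii, dw))
      = res ++ pvArun (PySem.Str.join "" ["DNS = ", PySem.Str.strip dns]) ls ii dw := by
  induction ls generalizing res ii dw with
  | nil => cases ii <;> cases dw <;> simp [pvArun, pvFinA]
  | cons l ls ih =>
    rw [List.foldl_cons, pvStepA_eq]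
    by_cases h1 : pvIsIface l = true <;> by_cases h2 : pvIsHeaderB l = true <;>
      by_cases h3 : pvIsDns l = true <;> cases ii <;> cases dw <;>
      simp [h1, h2, h3, pvArun, ih]

theorem pvGroupFold_some (ls : List String) (lead : List String)
    (gs : List (String × List String)) (h : String) (b : List String) :
    pvFinG (ls.foldl pvGroupStepB (lead, gs, some (h, b)))
      = (lead, gs ++ (h, b ++ (pvGroupRec ls).1) :: (pvGroupRec ls).2) := by
  induction ls generalizing gs h b with
  | nil => simp [pvFinG, pvGroupRec]
  | cons l ls ih =>
    rw [List.foldl_cons]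
    by_cases h1 : pvIsHeaderB l = true <;>
      simp [pvGroupStepB, h1, pvGroupRec, ih]

theorem pvGroupFold_none (ls : List String) (lead : List String)
    (gs : List (String × List String)) :
    pvFinG (ls.foldl pvGroupStepB (lead, gs, none))
      = (lead ++ (pvGroupRec ls).1, gs ++ (pvGroupRec ls).2) := by
  induction ls generalizing lead with
  | nil => simp [pvFinG, pvGroupRec]
  | cons l ls ih =>
    rw [List.foldl_cons]
    by_cases h1 : pvIsHeaderB l = true <;>
      simp [pvGroupStepB, h1, pvGroupRec, ih, pvGroupFold_some]

theorem pvBodyFold (D : String) (b : List String) (out : List String) (w : Bool) :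
    b.foldl (fun (s : List String × Bool) ln =>
      if PySem.Str.startswith (PySem.Str.lower (PySem.Str.strip ln)) "dns" then
        (s.1 ++ [D], true)
      else (s.1 ++ [ln], s.2)) (out, w)
    = (out ++ (pvBody D b w).1, (pvBody D b w).2) := by
  induction b generalizing out w with
  | nil => simp [pvBody]
  | cons l ls ih =>
    rw [List.foldl_cons]
    by_cases h1 : PySem.Str.startswith (PySem.Str.lower (PySem.Str.strip l)) "dns" = true
    · rw [if_pos h1, ih]
      have h1' : pvIsDns l = true := h1
      simp [pvBody, h1']
    · rw [if_neg h1, ih]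
      have h1' : ¬ pvIsDns l = true := h1
      simp [pvBody, h1']

-- one step of B's section loop, phrased with the proof-side functions
theorem pvStepB_eq (D : String) (out : List String) (pi w : Bool) (g : String × List String) :
    pvSectionStepB D (out, pi, w) g =
      (if pvIsIface g.1 then
        (out ++ g.1 :: (pvBody D g.2 w).1, true, (pvBody D g.2 w).2)
      else
        ((if pi && !w then out ++ [D] else out) ++ g.1 :: g.2, false, pi || w)) := by
  obtain ⟨h, b⟩ := g
  by_cases h1 : pvIsIface h = true
  · have h1' : (PySem.Str.lower (PySem.Str.strip h) == "[interface]") = true := h1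
    simp only [pvSectionStepB, h1']
    rw [pvBodyFold]
    cases pi <;> cases w <;> simp [h1]
  · have h1' : (PySem.Str.lower (PySem.Str.strip h) == "[interface]") = false := by
      simpa [pvIsIface] using h1
    cases pi <;> cases w <;> simp [pvSectionStepB, h1, h1']

set_option maxHeartbeats 1000000 in
theorem pvBfold (D : String) (gs : List (String × List String)) (out : List String)
    (pi w : Bool) :
    pvFinA D (gs.foldl (pvSectionStepB D) (out, pi, w))
      = out ++ pvBproc D gs pi w := by
  induction gs generalizing out pi w with
  | nil => cases pi <;> cases w <;> simp [pvBproc, pvFinA]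
  | cons g gs ih =>
    obtain ⟨h, b⟩ := g
    rw [List.foldl_cons, pvStepB_eq]
    by_cases h1 : pvIsIface h = true <;> cases pi <;> cases w <;>
      simp [h1, pvBproc, ih]

set_option maxHeartbeats 1000000 in
theorem pvMain (D : String) (ls : List String) (ii dw : Bool) :
    pvArun D ls ii dw =
      (if ii then
        (pvBody D (pvGroupRec ls).1 dw).1
          ++ pvBproc D (pvGroupRec ls).2 true (pvBody D (pvGroupRec ls).1 dw).2
      else (pvGroupRec ls).1 ++ pvBproc D (pvGroupRec ls).2 false dw) := by
  induction ls generalizing ii dw with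
  | nil => cases ii <;> cases dw <;> simp [pvArun, pvGroupRec, pvBproc, pvBody]
  | cons l ls ih =>
    by_cases h1 : pvIsIface l = true
    · have h2 : pvIsHeaderB l = true := pvIface_isHeader l h1
      cases ii <;> cases dw <;>
        simp [pvArun, pvGroupRec, pvBproc, pvBody, h1, h2, ih]
    · by_cases h2 : pvIsHeaderB l = true <;> by_cases h3 : pvIsDns l = true <;>
        cases ii <;> cases dw <;>
        simp [pvArun, pvGroupRec, pvBproc, pvBody, h1, h2, h3, ih]

theorem pvGroupB_eq (ls : List String) : pvGroupB ls = pvGroupRec ls := by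
  simpa [pvGroupB, pvFinG] using pvGroupFold_none ls [] []

-- ===== VERDICT (by name: the statement is the Claim_ definition above) =====
theorem apply_dns_override_spec : Claim_equal_apply_dns_override := by
  intro c d _
  unfold Spec_apply_dns_override
  by_cases hd : PySem.Str.strip d = ""
  · simp [apply_dns_override, apply_dns_override_alt, hd]
  · have hA' : ¬ ((d == "") || (PySem.Str.strip d == "")) = true := by
      simp only [Bool.or_eq_true, beq_iff_eq]
      rintro (rfl | h)
      · exact hd (by decide)
      · exact hd h
    have hB' : ¬ (PySem.Str.strip d == "") = true := by
      simpa using hd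
    have hAeq : apply_dns_override c d =
        PySem.Str.join "\n"
          ([] ++ pvArun (PySem.Str.join "" ["DNS = ", PySem.Str.strip d])
            (PySem.Str.splitlines c) false false) := by
      simp only [apply_dns_override]
      rw [if_neg hA']
      exact congrArg _ (pvAfold d (PySem.Str.splitlines c) [] false false)
    have hBeq : apply_dns_override_alt c d =
        PySem.Str.join "\n"
          ((pvGroupRec (PySem.Str.splitlines c)).1 ++
            pvBproc (PySem.Str.join "" ["DNS = ", PySem.Str.strip d])
              (pvGroupRec (PySem.Str.splitlines c)).2 false false) := by
      simp only [apply_dns_override_alt]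
      rw [if_neg hB', pvGroupB_eq]
      exact congrArg _ (pvBfold (PySem.Str.join "" ["DNS = ", PySem.Str.strip d])
        (pvGroupRec (PySem.Str.splitlines c)).2 (pvGroupRec (PySem.Str.splitlines c)).1
        false false)
    rw [hAeq, hBeq]
    have := pvMain (PySem.Str.join "" ["DNS = ", PySem.Str.strip d])
      (PySem.Str.splitlines c) false false
    simp only [if_neg (by simp : ¬ (false = true))] at this
    rw [List.nil_append, this]
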